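/- GENERATED by farm/mkstatement.py from design/units.tsv (unit `DGifDecompressLine.E`) and the assertions of Gif/Spec/Seg_DGifDecompressLine.lean — do not edit.
   THE STATEMENT of the proof unit `DGifDecompressLine.E`: segment E of `DGifDecompressLine` (9 instructions; entries 0x10709d;
   exits ret; ranges 0x10709d-0x1070ba)
   takes each of its entry assertions to one of its exit assertions (`Gif.Spec.DGifDecompressLine.SegE`), given the contracts of its callees.
   What the names mean: ProgX/Base/Spec/Basic.lean (the shared hypotheses), Gif/Spec/Seg_DGifDecompressLine.lean (the assertions). The theorem to prove:
   `theorem DGifDecompressLine_E_ok : Gif.Spec.DGifDecompressLine_E.Statement`. -/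
import Gif.Code
import Gif.Dec.All
import Gif.Labels
import Gif.Spec.Seg_DGifDecompressLine
namespace Gif.Spec.DGifDecompressLine_E
open X86 X86.User Asan

/-- The statement of unit `DGifDecompressLine.E`. -/
def Statement : Prop :=
  ∀ (Lay : Layout) (_hLay : Lay.hi = 0x1000000) (μ : Microarch) (_hμ : UserX.MicroOK μ) (u₀ : State)
    (_hcode : HasCodeNat Lay u₀ Gif.L.DGifDecompressLine.entry Gif.Code.code_DGifDecompressLine.nat Gif.L.DGifDecompressLine.size),
    Gif.Spec.DGifDecompressLine.SegE Lay μ u₀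

end Gif.Spec.DGifDecompressLine_E
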